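-- pv_equiv track=rewrite | github.com/YuWenHao1212/azure_container | src/services/resume_tailoring_v31.py | _merge_tracking
-- ===== SOURCE A (Python) =====
-- def _merge_tracking(llm1_result: dict, llm2_result: dict) -> list[str]:
--     """Merge tracking arrays from both LLMs."""
--
--     tracking1 = llm1_result.get("tracking", [])
--     tracking2 = llm2_result.get("tracking", [])
--
--     # Categorize tracking messages
--     categorized = []
--
--     # Process LLM1 tracking (Core sections)
--     for item in tracking1:
--         if "[Summary]" in item:
--             categorized.append(f"[Structure: Summary] {item.split(']', 1)[1].strip()}")
--         elif "[Skills]" in item: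
--             categorized.append(f"[Quick Win: Skills] {item.split(']', 1)[1].strip()}")
--         elif "[Experience]" in item:
--             categorized.append(f"[Presentation Gap: Experience] {item.split(']', 1)[1].strip()}")
--         else:
--             categorized.append(item)
--
--     # Process LLM2 tracking (Additional sections)
--     for item in tracking2:
--         if "[Education]" in item:
--             categorized.append(f"[Structure: Education] {item.split(']', 1)[1].strip()}")
--         elif "[Projects]" in item:
--             categorized.append(f"[Skill Gap: Projects] {item.split(']', 1)[1].strip()}")
--         elif "[Certifications]" in item:
--             categorized.append(f"[Skill Gap: Certifications] {item.split(']', 1)[1].strip()}")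
--         else:
--             categorized.append(item)
--
--     return categorized
-- ===== SOURCE B (Python) =====
-- PASSES = [
--     ("[Summary]", "[Structure: Summary]", 0),
--     ("[Skills]", "[Quick Win: Skills]", 0),
--     ("[Experience]", "[Presentation Gap: Experience]", 0),
--     ("[Education]", "[Structure: Education]", 1),
--     ("[Projects]", "[Skill Gap: Projects]", 1),
--     ("[Certifications]", "[Skill Gap: Certifications]", 1),
-- ]
--
--
-- def _merge_tracking(llm1_result: dict, llm2_result: dict) -> list[str]:
--     """Merge tracking arrays from both LLMs (tag-major staged passes)."""
--     items = [(it, 0) for it in llm1_result.get("tracking", [])] + \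
--             [(it, 1) for it in llm2_result.get("tracking", [])]
--     out = [None] * len(items)
--     # one full pass per tag, in priority order; a slot, once claimed, is final
--     for tag, prefix, src in PASSES:
--         for i, (item, s) in enumerate(items):
--             if out[i] is None and s == src and tag in item:
--                 out[i] = f"{prefix} {item.split(']', 1)[1].strip()}"
--     return [o if o is not None else item for o, (item, _) in zip(out, items)]
-- ===== Notes on version B (the rewrite author's own statement) =====
-- stated objective: alternative
-- what changed: Inverts the loop nesting: instead of A's item-major pass with two six-branch elif chains, B builds one source-marked item array, runs one full pass per tag (six staged passes in priority order) claiming an Optional result slot per item, then a final zip fills unclaimed slots with the original item.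
import Mathlib
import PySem

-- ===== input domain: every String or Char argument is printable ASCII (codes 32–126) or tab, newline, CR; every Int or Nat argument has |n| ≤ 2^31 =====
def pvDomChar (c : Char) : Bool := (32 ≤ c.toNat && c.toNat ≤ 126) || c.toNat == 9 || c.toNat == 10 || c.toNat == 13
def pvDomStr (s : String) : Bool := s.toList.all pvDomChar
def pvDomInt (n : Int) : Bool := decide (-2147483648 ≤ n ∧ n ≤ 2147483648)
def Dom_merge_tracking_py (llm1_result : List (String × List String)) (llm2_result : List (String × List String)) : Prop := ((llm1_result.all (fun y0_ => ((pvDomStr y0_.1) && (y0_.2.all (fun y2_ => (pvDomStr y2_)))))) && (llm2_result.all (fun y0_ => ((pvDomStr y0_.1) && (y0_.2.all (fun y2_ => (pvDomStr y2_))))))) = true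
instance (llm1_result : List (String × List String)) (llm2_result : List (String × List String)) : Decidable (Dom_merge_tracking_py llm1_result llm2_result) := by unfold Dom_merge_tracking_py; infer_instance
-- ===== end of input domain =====

-- B replaces A's item-major elif chains by tag-major staged passes over a source-marked item array with an Optional result slot per item (alternative decomposition; same cost).

-- ===== PORT A =====
-- item.split(']', 1)[1].strip() — only evaluated when a tag containing ']' is in item, so index 1 exists
def pvTailA (item : String) : String :=
  PySem.Str.strip (PySem.List.pyGetD ((PySem.Str.splitMax? item "]" 1).getD []) 1 "")

def merge_tracking_py (llm1_result : List (String × List String)) (llm2_result : List (String × List String)) : List String :=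
  let tracking1 := (PySem.Dict.mk llm1_result).getD "tracking" []
  let tracking2 := (PySem.Dict.mk llm2_result).getD "tracking" []
  let categorized : List String := []
  let categorized := tracking1.foldl (fun acc item =>
    if PySem.Str.isIn "[Summary]" item then
      acc ++ ["[Structure: Summary] " ++ pvTailA item]
    else if PySem.Str.isIn "[Skills]" item then
      acc ++ ["[Quick Win: Skills] " ++ pvTailA item]
    else if PySem.Str.isIn "[Experience]" item then
      acc ++ ["[Presentation Gap: Experience] " ++ pvTailA item]
    else
      acc ++ [item]) categorized
  let categorized := tracking2.foldl (fun acc item =>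
    if PySem.Str.isIn "[Education]" item then
      acc ++ ["[Structure: Education] " ++ pvTailA item]
    else if PySem.Str.isIn "[Projects]" item then
      acc ++ ["[Skill Gap: Projects] " ++ pvTailA item]
    else if PySem.Str.isIn "[Certifications]" item then
      acc ++ ["[Skill Gap: Certifications] " ++ pvTailA item]
    else
      acc ++ [item]) categorized
  categorized

-- ===== PORT B =====
def pvPasses : List (String × String × Nat) :=
  [("[Summary]", "[Structure: Summary]", 0),
   ("[Skills]", "[Quick Win: Skills]", 0),
   ("[Experience]", "[Presentation Gap: Experience]", 0),
   ("[Education]", "[Structure: Education]", 1),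
   ("[Projects]", "[Skill Gap: Projects]", 1),
   ("[Certifications]", "[Skill Gap: Certifications]", 1)]

-- one slot update: out[i] claimed by the first pass whose source and tag match
def pvUpd (p : String × String × Nat) (o : Option String) (q : String × Nat) : Option String :=
  if o.isNone && q.2 == p.2.2 && PySem.Str.isIn p.1 q.1 then
    some (p.2.1 ++ " " ++ PySem.Str.strip (PySem.List.pyGetD ((PySem.Str.splitMax? q.1 "]" 1).getD []) 1 ""))
  else o

def merge_tracking_py_alt (llm1_result : List (String × List String)) (llm2_result : List (String × List String)) : List String :=
  let items : List (String × Nat) :=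
    ((PySem.Dict.mk llm1_result).getD "tracking" []).map (fun it => (it, 0)) ++
    ((PySem.Dict.mk llm2_result).getD "tracking" []).map (fun it => (it, 1))
  let out : List (Option String) := items.map (fun _ => (none : Option String))
  let out := pvPasses.foldl (fun st p => List.zipWith (pvUpd p) st items) out
  List.zipWith (fun (o : Option String) (q : String × Nat) => o.getD q.1) out items

-- ===== PRECONDITION & SPEC =====
def Spec_merge_tracking_py (llm1_result : List (String × List String)) (llm2_result : List (String × List String)) (out : List String) : Prop := out = merge_tracking_py_alt llm1_result llm2_result
instance (llm1_result : List (String × List String)) (llm2_result : List (String × List String)) (out : List String) : Decidable (Spec_merge_tracking_py llm1_result llm2_result out) := by unfold Spec_merge_tracking_py; infer_instance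

-- ===== CLAIM (what is proved, stated in full; the proofs are below) =====
def Claim_equal_merge_tracking_py : Prop := ∀ (llm1_result : List (String × List String)) (llm2_result : List (String × List String)), Dom_merge_tracking_py llm1_result llm2_result → Spec_merge_tracking_py llm1_result llm2_result (merge_tracking_py llm1_result llm2_result)

-- ===== LEMMAS AND PROOFS =====
-- zipWith of a mapped list against the list itself is a pointwise map
theorem pvZipWith_map_self {α β γ : Type} (f : β → α → γ) (g : α → β) (l : List α) :
    List.zipWith f (l.map g) l = l.map (fun x => f (g x) x) := by
  induction l with
  | nil => rfl
  | cons x xs ih => simp [ih]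

-- a fold of elementwise zipWith passes, started from a map, is a map of the pointwise fold
theorem pvFoldl_zipWith_map {α β : Type} (upd : (String × String × Nat) → β → α → β)
    (ps : List (String × String × Nat)) (l : List α) (g : α → β) :
    ps.foldl (fun st p => List.zipWith (fun o q => upd p o q) st l) (l.map g)
      = l.map (fun q => ps.foldl (fun o p => upd p o q) (g q)) := by
  induction ps generalizing g with
  | nil => rfl
  | cons p ps ih =>
    simp only [List.foldl_cons]
    rw [pvZipWith_map_self (fun o q => upd p o q) g l, ih]

-- an append-a-singleton-per-item loop whose branches each append one element is a map
theorem pvFoldl_branch_map (c1 c2 c3 : String → Bool) (e1 e2 e3 : String → String)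
    (l : List String) (init : List String) :
    l.foldl (fun acc item =>
        if c1 item then acc ++ [e1 item]
        else if c2 item then acc ++ [e2 item]
        else if c3 item then acc ++ [e3 item]
        else acc ++ [item]) init
      = init ++ l.map (fun item =>
        if c1 item then e1 item
        else if c2 item then e2 item
        else if c3 item then e3 item
        else item) := by
  induction l generalizing init with
  | nil => simp
  | cons x xs ih =>
    simp only [List.foldl_cons, List.map_cons]
    rw [ih]
    split_ifs <;> simp

theorem pvUpd_src1 (p : String × String × Nat) (hp : p.2.2 = 1) (o : Option String) (item : String) :
    pvUpd p o (item, 0) = o := by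
  simp [pvUpd, hp]

theorem pvUpd_src0 (p : String × String × Nat) (hp : p.2.2 = 0) (o : Option String) (item : String) :
    pvUpd p o (item, 1) = o := by
  simp [pvUpd, hp]

-- the pointwise fold over the six passes, for a source-0 item, is A's first elif chain
theorem pvCell_core (item : String) :
    (pvPasses.foldl (fun o p => pvUpd p o (item, 0)) none).getD item
      = (if PySem.Str.isIn "[Summary]" item then "[Structure: Summary] " ++ pvTailA item
         else if PySem.Str.isIn "[Skills]" item then "[Quick Win: Skills] " ++ pvTailA item
         else if PySem.Str.isIn "[Experience]" item then "[Presentation Gap: Experience] " ++ pvTailA item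
         else item) := by
  simp only [pvPasses, List.foldl_cons, List.foldl_nil]
  rw [pvUpd_src1 ("[Education]", "[Structure: Education]", 1) rfl,
      pvUpd_src1 ("[Projects]", "[Skill Gap: Projects]", 1) rfl,
      pvUpd_src1 ("[Certifications]", "[Skill Gap: Certifications]", 1) rfl]
  simp only [pvUpd, pvTailA]
  generalize PySem.Str.isIn "[Summary]" item = b1
  generalize PySem.Str.isIn "[Skills]" item = b2
  generalize PySem.Str.isIn "[Experience]" item = b3
  cases b1 <;> cases b2 <;> cases b3 <;> simp

-- the pointwise fold over the six passes, for a source-1 item, is A's second elif chain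
theorem pvCell_add (item : String) :
    (pvPasses.foldl (fun o p => pvUpd p o (item, 1)) none).getD item
      = (if PySem.Str.isIn "[Education]" item then "[Structure: Education] " ++ pvTailA item
         else if PySem.Str.isIn "[Projects]" item then "[Skill Gap: Projects] " ++ pvTailA item
         else if PySem.Str.isIn "[Certifications]" item then "[Skill Gap: Certifications] " ++ pvTailA item
         else item) := by
  simp only [pvPasses, List.foldl_cons, List.foldl_nil]
  rw [pvUpd_src0 ("[Summary]", "[Structure: Summary]", 0) rfl,
      pvUpd_src0 ("[Skills]", "[Quick Win: Skills]", 0) rfl,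
      pvUpd_src0 ("[Experience]", "[Presentation Gap: Experience]", 0) rfl]
  simp only [pvUpd, pvTailA]
  generalize PySem.Str.isIn "[Education]" item = b1
  generalize PySem.Str.isIn "[Projects]" item = b2
  generalize PySem.Str.isIn "[Certifications]" item = b3
  cases b1 <;> cases b2 <;> cases b3 <;> simp

-- ===== VERDICT (by name: the statement is the Claim_ definition above) =====
theorem merge_tracking_py_spec : Claim_equal_merge_tracking_py := by
  intro l1 l2 _
  unfold Spec_merge_tracking_py merge_tracking_py merge_tracking_py_alt
  dsimp only
  rw [pvFoldl_branch_map, pvFoldl_branch_map,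
      pvFoldl_zipWith_map pvUpd pvPasses _ (fun _ => none),
      pvZipWith_map_self]
  simp only [List.map_append, List.map_map]
  rw [List.nil_append]
  congr 1
  · exact List.map_congr_left (fun it _ => (pvCell_core it).symm)
  · exact List.map_congr_left (fun it _ => (pvCell_add it).symm)
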